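-- pv_equiv track=rewrite | github.com/kurosiro2/n-gram | exp/statistics/ngram/ngram_condprob_distribution.py | filter_seqs_by_date
-- ===== SOURCE A (Python) =====
-- def filter_seqs_by_date(seqs, start_date: int, end_date: int):
--     """
--     seqs: {(nurse_id, name): [(date, shift), ...]}
--     から、指定された日付範囲 [start_date, end_date] に入るシフトだけを残す。
--
--     1人分のシフトが全部範囲外なら、その人自体を削除する。
--     """
--     filtered = {}
--     for key, seq in seqs.items():
--         sub = [(d, s) for (d, s) in seq if start_date <= d <= end_date]
--         if sub:
--             sub.sort(key=lambda t: t[0])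
--             filtered[key] = sub
--     return filtered
-- ===== SOURCE B (Python) =====
-- def _bisect_left(a, x):
--     lo, hi = 0, len(a)
--     while lo < hi:
--         mid = (lo + hi) // 2
--         if a[mid] < x:
--             lo = mid + 1
--         else:
--             hi = mid
--     return lo
--
--
-- def _bisect_right(a, x):
--     lo, hi = 0, len(a)
--     while lo < hi:
--         mid = (lo + hi) // 2
--         if x < a[mid]:
--             hi = mid
--         else:
--             lo = mid + 1
--     return lo
--
--
-- def filter_seqs_by_date(seqs, start_date: int, end_date: int):
--     out = {}
--     for key, seq in seqs.items():
--         srt = sorted(seq, key=lambda t: t[0])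
--         dates = [d for d, _ in srt]
--         lo = _bisect_left(dates, start_date)
--         hi = _bisect_right(dates, end_date)
--         if lo < hi:
--             out[key] = srt[lo:hi]
--     return out
-- ===== Notes on version B (the rewrite author's own statement) =====
-- stated objective: alternative
-- what changed: Instead of A's per-key filter of the shifts followed by a sort of the survivors, B stable-sorts each whole sequence by date once and then locates the inclusive date range by hand-written binary search (bisect_left/bisect_right on the date column), returning the contiguous slice; a key is kept only when the slice is non-empty.
import Mathlib
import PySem

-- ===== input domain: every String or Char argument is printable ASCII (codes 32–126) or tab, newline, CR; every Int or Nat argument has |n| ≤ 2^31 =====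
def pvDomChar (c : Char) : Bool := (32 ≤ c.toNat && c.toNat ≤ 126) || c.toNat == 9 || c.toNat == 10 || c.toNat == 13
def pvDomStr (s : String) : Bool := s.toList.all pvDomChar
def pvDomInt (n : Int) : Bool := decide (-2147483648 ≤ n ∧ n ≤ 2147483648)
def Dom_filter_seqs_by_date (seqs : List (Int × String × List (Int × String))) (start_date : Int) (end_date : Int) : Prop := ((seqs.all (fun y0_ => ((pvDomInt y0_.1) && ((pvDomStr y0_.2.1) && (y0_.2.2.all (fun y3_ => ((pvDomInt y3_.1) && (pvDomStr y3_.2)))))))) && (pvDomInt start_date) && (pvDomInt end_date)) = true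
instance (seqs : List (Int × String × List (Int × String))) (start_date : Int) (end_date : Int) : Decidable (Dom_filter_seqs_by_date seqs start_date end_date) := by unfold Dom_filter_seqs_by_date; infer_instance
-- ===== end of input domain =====

-- B replaces A's filter-then-sort of each person's shifts by a sort of the whole
-- sequence followed by binary search for the two range boundaries and a contiguous
-- slice (objective: alternative decomposition, same cost).

-- ===== PORT A =====
-- A: for each (key, seq), keep the shifts inside [start_date, end_date], sort the
-- survivors by date, keep the key only if any survive.
def filter_seqs_by_date (seqs : List (Int × String × List (Int × String))) (start_date : Int) (end_date : Int) : List (Int × String × List (Int × String)) :=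
  seqs.foldl (fun filtered kv =>
    let sub := kv.2.2.filter (fun t => decide (start_date ≤ t.1 ∧ t.1 ≤ end_date))
    if sub.isEmpty then filtered
    else filtered ++ [(kv.1, kv.2.1, PySem.List.sorted sub (fun t => t.1))]) []

-- ===== PORT B =====
-- B: stable-sort the whole sequence by date, binary-search the boundaries of the
-- inclusive range (Source B's hand-written _bisect_left/_bisect_right are the standard
-- bisect loops = PySem.List.bisectLeft/bisectRight), take the slice srt[lo:hi].
def filter_seqs_by_date_alt (seqs : List (Int × String × List (Int × String))) (start_date : Int) (end_date : Int) : List (Int × String × List (Int × String)) :=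
  seqs.foldl (fun out kv =>
    let srt := PySem.List.sorted kv.2.2 (fun t => t.1)
    let dates := srt.map (fun t => t.1)
    let lo := PySem.List.bisectLeft dates start_date
    let hi := PySem.List.bisectRight dates end_date
    if lo < hi then out ++ [(kv.1, kv.2.1, PySem.List.slice srt (some (lo : Int)) (some (hi : Int)))]
    else out) []

-- ===== PRECONDITION & SPEC =====
def Spec_filter_seqs_by_date (seqs : List (Int × String × List (Int × String))) (start_date : Int) (end_date : Int) (out : List (Int × String × List (Int × String))) : Prop := out = filter_seqs_by_date_alt seqs start_date end_date
instance (seqs : List (Int × String × List (Int × String))) (start_date : Int) (end_date : Int) (out : List (Int × String × List (Int × String))) : Decidable (Spec_filter_seqs_by_date seqs start_date end_date out) := by unfold Spec_filter_seqs_by_date; infer_instance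

-- ===== CLAIM (what is proved, stated in full; the proofs are below) =====
def Claim_equal_filter_seqs_by_date : Prop := ∀ (seqs : List (Int × String × List (Int × String))) (start_date : Int) (end_date : Int), Dom_filter_seqs_by_date seqs start_date end_date → Spec_filter_seqs_by_date seqs start_date end_date (filter_seqs_by_date seqs start_date end_date)

-- ===== LEMMAS AND PROOFS =====

-- filtering by a predicate on the sort key commutes with a single insertBy step,
-- provided the list the element is inserted into is already key-sorted
theorem pv_insertBy_front {α : Type} (b : α → α → Bool) (x : α) (zs : List α)
    (h : ∀ z ∈ zs, b x z = true) :
    PySem.List.insertBy b x zs = x :: zs := by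
  cases zs with
  | nil => simp [PySem.List.insertBy]
  | cons z zs => simp [PySem.List.insertBy, h z List.mem_cons_self]

theorem pv_filter_insertBy {α : Type} (key : α → Int) (q : α → Bool)
    (x : α) (ys : List α) (hs : ys.Pairwise (fun a b => key a ≤ key b)) :
    (PySem.List.insertBy (fun a b => decide (key a < key b)) x ys).filter q =
      if q x then PySem.List.insertBy (fun a b => decide (key a < key b)) x (ys.filter q)
      else ys.filter q := by
  induction ys with
  | nil =>
    cases hqx : q x <;> simp [PySem.List.insertBy, hqx]
  | cons y ys ih =>
    have hs' : ys.Pairwise (fun a b => key a ≤ key b) := hs.tail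
    have hy : ∀ z ∈ ys, key y ≤ key z := (List.pairwise_cons.mp hs).1
    by_cases hlt : key x < key y
    · have hdec : (decide (key x < key y)) = true := by simpa using hlt
      have hins : PySem.List.insertBy (fun a b => decide (key a < key b)) x (y :: ys)
          = x :: y :: ys := by simp [PySem.List.insertBy, hdec]
      cases hqx : q x
      · simp [hins, List.filter_cons, hqx]
      · have hfront : ∀ z ∈ (y :: ys).filter q, decide (key x < key z) = true := by
          intro z hz
          have hzmem : z ∈ y :: ys := List.mem_of_mem_filter hz
          have hkz : key y ≤ key z := by
            rcases List.mem_cons.mp hzmem with h | h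
            · exact le_of_eq (congrArg key h).symm
            · exact hy _ h
          simp; omega
        rw [hins, if_pos rfl, pv_insertBy_front _ _ _ hfront, List.filter_cons, hqx]
        simp
    · have hdec : (decide (key x < key y)) = false := by simpa using hlt
      have hins : PySem.List.insertBy (fun a b => decide (key a < key b)) x (y :: ys)
          = y :: PySem.List.insertBy (fun a b => decide (key a < key b)) x ys := by
        simp [PySem.List.insertBy, hdec]
      rw [hins]
      cases hqy : q y
      · rw [List.filter_cons, hqy, List.filter_cons, hqy]
        simpa using ih hs'
      · rw [List.filter_cons, hqy, List.filter_cons, hqy]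
        simp only [if_true]
        rw [ih hs']
        cases hqx : q x
        · simp
        · simp [PySem.List.insertBy, hdec]

-- filtering by a key predicate commutes with the stable sort
theorem pv_sorted_filter_comm {α : Type} (key : α → Int) (q : α → Bool)
    (xs : List α) :
    PySem.List.sorted (xs.filter q) key = (PySem.List.sorted xs key).filter q := by
  induction xs using List.reverseRecOn with
  | nil => simp [PySem.List.sorted]
  | append_singleton xs x ih =>
    have hsnoc : ∀ (l : List α), PySem.List.sorted (l ++ [x]) key
        = PySem.List.insertBy (fun a b => decide (key a < key b)) x (PySem.List.sorted l key) := by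
      intro l
      rw [PySem.List.sorted_eq_foldl_insertBy, PySem.List.sorted_eq_foldl_insertBy, List.foldl_append]
      rfl
    have hpair := PySem.List.sorted_pairwise (xs := xs) (key := key)
    rw [List.filter_append, hsnoc xs,
      pv_filter_insertBy key q x _ hpair]
    cases hqx : q x
    · simp [List.filter, hqx, ih]
    · have : PySem.List.sorted (xs.filter q ++ [x]) key
          = PySem.List.insertBy (fun a b => decide (key a < key b)) x (PySem.List.sorted (xs.filter q) key) := hsnoc _
      simp [List.filter, hqx, this, ih]

-- on a key-sorted list the inclusive date-range filter is the contiguous slice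
-- between the two bisect boundaries
theorem pv_filter_eq_take_drop (srt : List (Int × String)) (sd ed : Int)
    (hp : (srt.map (fun t => t.1)).Pairwise (· ≤ ·)) :
    srt.filter (fun t => decide (sd ≤ t.1 ∧ t.1 ≤ ed))
      = (srt.drop (PySem.List.bisectLeft (srt.map (fun t => t.1)) sd)).take
          (PySem.List.bisectRight (srt.map (fun t => t.1)) ed
            - PySem.List.bisectLeft (srt.map (fun t => t.1)) sd) := by
  set dates := srt.map (fun t => t.1) with hdates
  obtain ⟨hlo_le, hlo_lt, hlo_ge⟩ := PySem.List.bisectLeft_spec dates sd hp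
  obtain ⟨hhi_le, hhi_lt, hhi_ge⟩ := PySem.List.bisectRight_spec dates ed hp
  set lo := PySem.List.bisectLeft dates sd with hlo
  set hi := PySem.List.bisectRight dates ed with hhi
  have hlen : dates.length = srt.length := by rw [hdates, List.length_map]
  have hidx : ∀ (j : ℕ) (hj : j < srt.length), dates[j]'(by omega) = srt[j].1 := by
    intro j hj; simp only [hdates, List.getElem_map]
  have h1 : srt.filter (fun t => decide (sd ≤ t.1 ∧ t.1 ≤ ed))
      = (srt.take lo).filter (fun t => decide (sd ≤ t.1 ∧ t.1 ≤ ed))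
        ++ (((srt.drop lo).take (hi - lo)).filter (fun t => decide (sd ≤ t.1 ∧ t.1 ≤ ed))
        ++ ((srt.drop lo).drop (hi - lo)).filter (fun t => decide (sd ≤ t.1 ∧ t.1 ≤ ed))) := by
    conv_lhs => rw [← List.take_append_drop lo srt]
    rw [List.filter_append]
    conv_lhs => rw [← List.take_append_drop (hi - lo) (srt.drop lo)]
    rw [List.filter_append]
  rw [h1]
  have hA : (srt.take lo).filter (fun t => decide (sd ≤ t.1 ∧ t.1 ≤ ed)) = [] := by
    rw [List.filter_eq_nil_iff]
    intro a ha
    obtain ⟨i, hilen, hget⟩ := List.getElem_of_mem ha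
    have hilt : i < lo := by have := hilen; simp [List.length_take] at this; omega
    have hsl : i < srt.length := by have := hilen; simp [List.length_take] at this; omega
    have hgi : a = srt[i] := by rw [← hget, List.getElem_take]
    have := hlo_lt i (by omega) hilt
    rw [hidx i hsl] at this
    rw [hgi]; simp; omega
  have hB : ((srt.drop lo).take (hi - lo)).filter (fun t => decide (sd ≤ t.1 ∧ t.1 ≤ ed))
      = (srt.drop lo).take (hi - lo) := by
    rw [List.filter_eq_self]
    intro a ha
    obtain ⟨i, hilen, hget⟩ := List.getElem_of_mem ha
    have hi1 : i < hi - lo ∧ i < srt.length - lo := by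
      have := hilen; simp [List.length_take, List.length_drop] at this; omega
    have hsl : lo + i < srt.length := by omega
    have hgi : a = srt[lo + i] := by
      rw [← hget, List.getElem_take, List.getElem_drop]
    have h2 := hlo_ge (lo + i) (by omega) (by omega)
    have h3 := hhi_lt (lo + i) (by omega) (by omega)
    rw [hidx (lo + i) hsl] at h2 h3
    rw [hgi]; simp; omega
  have hC : ((srt.drop lo).drop (hi - lo)).filter (fun t => decide (sd ≤ t.1 ∧ t.1 ≤ ed)) = [] := by
    rw [List.filter_eq_nil_iff]
    intro a ha
    obtain ⟨i, hilen, hget⟩ := List.getElem_of_mem ha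
    have hi1 : (hi - lo) + i < srt.length - lo := by
      have := hilen; simp [List.length_drop] at this; omega
    have hsl : lo + ((hi - lo) + i) < srt.length := by omega
    have hgi : a = srt[lo + ((hi - lo) + i)] := by
      rw [← hget, List.getElem_drop, List.getElem_drop]
    have h3 := hhi_ge (lo + ((hi - lo) + i)) (by omega) (by omega)
    rw [hidx _ hsl] at h3
    rw [hgi]; simp; omega
  rw [hA, hB, hC]; simp

-- ===== VERDICT (by name: the statement is the Claim_ definition above) =====
theorem filter_seqs_by_date_spec : Claim_equal_filter_seqs_by_date := by
  intro seqs sd ed _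
  unfold Spec_filter_seqs_by_date filter_seqs_by_date filter_seqs_by_date_alt
  apply List.foldl_ext
  intro acc kv _
  dsimp only
  set srt := PySem.List.sorted kv.2.2 (fun t => t.1) with hsrt
  set dates := srt.map (fun t => t.1) with hdates
  set lo := PySem.List.bisectLeft dates sd with hlo
  set hi := PySem.List.bisectRight dates ed with hhi
  have hpair : dates.Pairwise (· ≤ ·) := by
    rw [hdates, hsrt]; exact PySem.List.sorted_map_key_pairwise _ _
  have hhile : hi ≤ srt.length := by
    have := (PySem.List.bisectRight_spec dates ed hpair).1
    rw [hdates, List.length_map] at this; exact this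
  have hsub : PySem.List.sorted (kv.2.2.filter (fun t => decide (sd ≤ t.1 ∧ t.1 ≤ ed))) (fun t => t.1)
      = (srt.drop lo).take (hi - lo) := by
    rw [pv_sorted_filter_comm, ← hsrt, pv_filter_eq_take_drop srt sd ed (by rw [← hdates]; exact hpair)]
  have hslice : PySem.List.slice srt (some (lo : Int)) (some (hi : Int)) = (srt.drop lo).take (hi - lo) :=
    PySem.List.slice_natCast srt lo hi
  by_cases hlh : lo < hi
  · have hne : (kv.2.2.filter (fun t => decide (sd ≤ t.1 ∧ t.1 ≤ ed))).isEmpty = false := by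
      rw [List.isEmpty_eq_false_iff]
      intro hctr
      have hnil : PySem.List.sorted (kv.2.2.filter (fun t => decide (sd ≤ t.1 ∧ t.1 ≤ ed))) (fun t => t.1) = [] :=
        (PySem.List.sorted_eq_nil_iff _ _ _).mpr hctr
      rw [hsub] at hnil
      have hl := congrArg List.length hnil
      simp [List.length_take, List.length_drop] at hl
      omega
    rw [hne, if_neg (by simp), if_pos hlh, hsub, hslice]
  · have hemp : (kv.2.2.filter (fun t => decide (sd ≤ t.1 ∧ t.1 ≤ ed))).isEmpty = true := by
      rw [List.isEmpty_iff]
      apply (PySem.List.sorted_eq_nil_iff _ (fun t : Int × String => t.1) false).mp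
      rw [hsub]
      have : hi - lo = 0 := by omega
      rw [this]; simp
    rw [hemp, if_pos rfl, if_neg hlh]
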